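-- pv_equiv track=rewrite | github.com/buytheaway/CATAN-GAME | tools/multiplayer_smoke.py | _plan_discard_from_state
-- ===== SOURCE A (Python) =====
-- def _plan_discard_from_state(state: dict, pid: int, need: int) -> dict:
--     res = (state.get("players", [{}])[pid].get("res", {}) if state.get("players") else {})
--     plan = {r: 0 for r in res.keys()}
--     remaining = int(need)
--     for r in sorted(res.keys()):
--         if remaining <= 0:
--             break
--         take = min(int(res.get(r, 0)), remaining)
--         if take > 0:
--             plan[r] = take
--             remaining -= take
--     return plan
-- ===== SOURCE B (Python) =====
-- def _plan_discard_from_state(state: dict, pid: int, need: int) -> dict: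
--     res = (state.get("players", [{}])[pid].get("res", {}) if state.get("players") else {})
--     need_i = int(need)
--     # prefix table: total (clamped-positive) count of all alphabetically earlier resources
--     order = sorted(res.keys())
--     prefix_before = {}
--     total = 0
--     for r in order:
--         prefix_before[r] = total
--         total += max(int(res.get(r, 0)), 0)
--     # each take is computed independently off the prefix table
--     return {r: max(0, min(int(res.get(r, 0)), need_i - prefix_before.get(r, 0))) for r in res.keys()}
-- ===== Notes on version B (the rewrite author's own statement) =====
-- stated objective: alternative
-- what changed: Replaces the sequential greedy loop with a mutable remaining counter and early break by a precomputed prefix-sum table over the sorted resource keys, so each resource's take is computed independently as max(0, min(count, need - prefix_before)) in a dict comprehension.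
import Mathlib
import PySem

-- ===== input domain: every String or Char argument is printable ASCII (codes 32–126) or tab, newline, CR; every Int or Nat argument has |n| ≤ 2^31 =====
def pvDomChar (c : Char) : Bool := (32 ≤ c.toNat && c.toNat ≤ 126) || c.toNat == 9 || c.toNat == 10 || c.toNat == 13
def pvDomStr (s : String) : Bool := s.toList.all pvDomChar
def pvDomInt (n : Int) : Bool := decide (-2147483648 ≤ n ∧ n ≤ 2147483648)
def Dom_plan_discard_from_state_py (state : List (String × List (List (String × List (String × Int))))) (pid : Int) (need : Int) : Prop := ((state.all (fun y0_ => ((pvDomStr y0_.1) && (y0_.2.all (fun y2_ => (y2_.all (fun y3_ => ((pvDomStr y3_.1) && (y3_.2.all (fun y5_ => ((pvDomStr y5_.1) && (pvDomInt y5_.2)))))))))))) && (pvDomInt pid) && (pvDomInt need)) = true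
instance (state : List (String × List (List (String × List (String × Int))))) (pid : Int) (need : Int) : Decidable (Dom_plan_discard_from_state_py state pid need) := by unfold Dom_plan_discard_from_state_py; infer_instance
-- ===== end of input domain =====

-- B replaces A's sequential greedy loop (mutable `remaining`, early break) with a precomputed
-- prefix-sum table over the sorted resource keys, each take computed independently (objective:
-- alternative decomposition, same cost).

-- ===== PORT A =====
-- shared res-extraction: the expression
--   (state.get("players", [{}])[pid].get("res", {}) if state.get("players") else {})
-- which appears verbatim in both A and B.  (the `none` branch of pyGet? is Python's
-- IndexError on players[pid]; those inputs are excluded by Pre_ below)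
def pvResOf (state : List (String × List (List (String × List (String × Int))))) (pid : Int) : List (String × Int) :=
  let players := PySem.Dict.getD (PySem.Dict.mk state) "players" []
  if players = [] then []
  else
    match PySem.List.pyGet? players pid with
    | some p => PySem.Dict.getD (PySem.Dict.mk p) "res" []
    | none => []

-- res.keys() of the dict `res` (assoc-list encoding of a Python dict: distinct keys in order)
def pvKeysOf (res : List (String × Int)) : List String :=
  PySem.List.dedup (res.map Prod.fst)

-- the `for r in sorted(res.keys()): … break …` loop of A, state = (plan, remaining)
def pvPlanLoop (res : List (String × Int)) : PySem.Dict String Int → Int → List String → PySem.Dict String Int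
  | plan, _, [] => plan
  | plan, remaining, r :: rest =>
    if remaining ≤ 0 then plan
    else
      let take := min (PySem.Dict.getD (PySem.Dict.mk res) r 0) remaining
      if 0 < take then pvPlanLoop res (plan.insert r take) (remaining - take) rest
      else pvPlanLoop res plan remaining rest

def plan_discard_from_state_py (state : List (String × List (List (String × List (String × Int))))) (pid : Int) (need : Int) : List (String × Int) :=
  let res := pvResOf state pid
  let keys := pvKeysOf res
  let plan0 : PySem.Dict String Int := keys.foldl (fun d r => d.insert r 0) PySem.Dict.empty
  (pvPlanLoop res plan0 need (PySem.List.sorted keys (fun r => r) false)).items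

-- ===== PORT B =====
-- the prefix-table loop of B: state = (prefix_before, total)
def pvPrefLoop (res : List (String × Int)) (order : List String) : PySem.Dict String Int × Int :=
  order.foldl
    (fun st r => (st.1.insert r st.2, st.2 + max (PySem.Dict.getD (PySem.Dict.mk res) r 0) 0))
    (PySem.Dict.empty, 0)

def plan_discard_from_state_py_alt (state : List (String × List (List (String × List (String × Int))))) (pid : Int) (need : Int) : List (String × Int) :=
  let res := pvResOf state pid
  let keys := pvKeysOf res
  let order := PySem.List.sorted keys (fun r => r) false
  let pref := (pvPrefLoop res order).1
  (keys.foldl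
    (fun d r => d.insert r
      (max 0 (min (PySem.Dict.getD (PySem.Dict.mk res) r 0) (need - PySem.Dict.getD pref r 0))))
    PySem.Dict.empty).items

-- ===== PRECONDITION & SPEC =====
-- Pre_ excludes exactly the inputs where Python A raises IndexError on players[pid]:
-- a non-empty "players" list with pid outside [-len, len).
def Pre_plan_discard_from_state_py (state : List (String × List (List (String × List (String × Int))))) (pid : Int) (need : Int) : Prop :=
  PySem.Dict.getD (PySem.Dict.mk state) "players" [] = [] ∨
  PySem.Raise.InRange (PySem.Dict.getD (PySem.Dict.mk state) "players" []).length pid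
instance (state : List (String × List (List (String × List (String × Int))))) (pid : Int) (need : Int) : Decidable (Pre_plan_discard_from_state_py state pid need) := by unfold Pre_plan_discard_from_state_py; infer_instance

def pvWitness_plan_discard_from_state_py : (List (String × List (List (String × List (String × Int))))) × Int × Int :=
  ([("players", [[("res", [("a", 2), ("b", 3)])]])], 0, 4)

def Spec_plan_discard_from_state_py (state : List (String × List (List (String × List (String × Int))))) (pid : Int) (need : Int) (out : List (String × Int)) : Prop := out = plan_discard_from_state_py_alt state pid need
instance (state : List (String × List (List (String × List (String × Int))))) (pid : Int) (need : Int) (out : List (String × Int)) : Decidable (Spec_plan_discard_from_state_py state pid need out) := by unfold Spec_plan_discard_from_state_py; infer_instance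

-- ===== CLAIM (what is proved, stated in full; the proofs are below) =====
def Claim_equal_plan_discard_from_state_py : Prop := ∀ (state : List (String × List (List (String × List (String × Int))))) (pid : Int) (need : Int), Dom_plan_discard_from_state_py state pid need → Pre_plan_discard_from_state_py state pid need → Spec_plan_discard_from_state_py state pid need (plan_discard_from_state_py state pid need)

-- ===== LEMMAS AND PROOFS =====

-- the (clamped-positive) prefix sum of counts strictly before the first occurrence of r in S
def pvPrefAt (res : List (String × Int)) : List String → String → Int
  | [], _ => 0
  | x :: xs, r =>
    if x = r then 0
    else max (PySem.Dict.getD (PySem.Dict.mk res) x 0) 0 + pvPrefAt res xs r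

lemma pvPrefAt_nonneg (res : List (String × Int)) (S : List String) (r : String) :
    0 ≤ pvPrefAt res S r := by
  induction S with
  | nil => simp [pvPrefAt]
  | cons x xs ih =>
    simp only [pvPrefAt]
    split_ifs
    · omega
    · have := le_max_right (PySem.Dict.getD (PySem.Dict.mk res) x 0) 0
      omega

-- B's prefix table holds exactly pvPrefAt (shifted by the running total t)
lemma pvPrefLoop_getD (res : List (String × Int)) (S : List String) :
    ∀ (d : PySem.Dict String Int) (t : Int) (r : String), S.Nodup →
      ((S.foldl
        (fun st x => (st.1.insert x st.2, st.2 + max (PySem.Dict.getD (PySem.Dict.mk res) x 0) 0))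
        (d, t)).1).getD r 0
      = if r ∈ S then t + pvPrefAt res S r else d.getD r 0 := by
  induction S with
  | nil => intro d t r _; simp
  | cons x xs ih =>
    intro d t r hnd
    rw [List.nodup_cons] at hnd
    simp only [List.foldl_cons]
    rw [ih _ _ r hnd.2]
    by_cases hx : r = x
    · subst hx
      simp [hnd.1, pvPrefAt]
    · by_cases hmem : r ∈ xs
      · simp [hmem, hx, pvPrefAt, Ne.symm hx]
        omega
      · simp [hmem, hx, PySem.Dict.getD_insert, List.mem_cons]

-- A's loop, on a dict whose items are M.map (r, w r), rewrites each key of S to the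
-- closed-form value max 0 (min count (rem - prefix)) and leaves the others alone
lemma pvPlanLoop_items (res : List (String × Int)) (S : List String) :
    ∀ (rem : Int) (M : List String) (w : String → Int) (plan : PySem.Dict String Int),
      S.Nodup → M.Nodup → plan.items = M.map (fun r => (r, w r)) →
      (∀ r ∈ S, r ∈ M ∧ w r = 0) →
      (pvPlanLoop res plan rem S).items
        = M.map (fun r => (r,
            if r ∈ S then
              max 0 (min (PySem.Dict.getD (PySem.Dict.mk res) r 0) (rem - pvPrefAt res S r))
            else w r)) := by
  induction S with
  | nil => intro rem M w plan _ _ hplan _; simpa [pvPlanLoop] using hplan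
  | cons x xs ih =>
    intro rem M w plan hnd hM hplan hS
    rw [List.nodup_cons] at hnd
    simp only [pvPlanLoop]
    by_cases hrem : rem ≤ 0
    · rw [if_pos hrem, hplan]
      apply List.map_congr_left
      intro r hr
      by_cases hmem : r ∈ x :: xs
      · have h0 : pvPrefAt res (x :: xs) r ≥ 0 := pvPrefAt_nonneg res _ r
        have hw : w r = 0 := (hS r hmem).2
        simp only [hmem, if_pos]
        have : max 0 (min (PySem.Dict.getD (PySem.Dict.mk res) r 0) (rem - pvPrefAt res (x :: xs) r)) = 0 := by
          have : rem - pvPrefAt res (x :: xs) r ≤ 0 := by omega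
          omega
        rw [this, hw]
      · simp [hmem]
    · rw [if_neg hrem]
      have hrem' : 0 < rem := by omega
      by_cases htake : 0 < min (PySem.Dict.getD (PySem.Dict.mk res) x 0) rem
      · rw [if_pos htake]
        have hcpos : 0 < PySem.Dict.getD (PySem.Dict.mk res) x 0 := by omega
        -- the insert overwrites key x in place
        have hxM : x ∈ M := (hS x (by simp)).1
        have hcont : plan.contains x = true := by
          rw [PySem.Dict.contains_iff_mem_keys]
          simp only [PySem.Dict.keys, hplan, List.map_map]
          simpa using hxM
        have hplan' : (plan.insert x (min (PySem.Dict.getD (PySem.Dict.mk res) x 0) rem)).items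
            = M.map (fun r => (r, if r = x then min (PySem.Dict.getD (PySem.Dict.mk res) x 0) rem else w r)) := by
          rw [PySem.Dict.items_insert_of_contains _ _ hcont, hplan, List.map_map]
          apply List.map_congr_left
          intro r _
          by_cases h : r = x <;> simp [h]
        rw [ih (rem - min (PySem.Dict.getD (PySem.Dict.mk res) x 0) rem) M
            (fun r => if r = x then min (PySem.Dict.getD (PySem.Dict.mk res) x 0) rem else w r) _ hnd.2 hM hplan'
            (by intro r hr; exact ⟨(hS r (by simp [hr])).1,
              by have : r ≠ x := fun h => hnd.1 (h ▸ hr); simp [this, (hS r (by simp [hr])).2]⟩)]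
        apply List.map_congr_left
        intro r hrM
        by_cases hx : r = x
        · subst hx
          have hnx : r ∉ xs := hnd.1
          rw [if_neg hnx, if_pos rfl, if_pos (by simp : r ∈ r :: xs), pvPrefAt, if_pos rfl]
          simp only [Prod.mk.injEq, true_and]
          omega
        · by_cases hmem : r ∈ xs
          · rw [if_pos hmem, if_pos (by simp [hmem] : r ∈ x :: xs), pvPrefAt, if_neg (Ne.symm hx)]
            have hp := pvPrefAt_nonneg res xs r
            simp only [Prod.mk.injEq, true_and]
            omega
          · rw [if_neg hmem, if_neg (by simp [hx, hmem] : ¬ r ∈ x :: xs), if_neg hx]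
      · rw [if_neg htake]
        have hcle : PySem.Dict.getD (PySem.Dict.mk res) x 0 ≤ 0 := by omega
        rw [ih rem M w plan hnd.2 hM hplan (fun r hr => hS r (by simp [hr]))]
        apply List.map_congr_left
        intro r hrM
        by_cases hx : r = x
        · subst hx
          have hnx : r ∉ xs := hnd.1
          have hw : w r = 0 := (hS r (by simp)).2
          rw [if_neg hnx, hw, if_pos (by simp : r ∈ r :: xs), pvPrefAt, if_pos rfl]
          simp only [Prod.mk.injEq, true_and]
          omega
        · by_cases hmem : r ∈ xs
          · rw [if_pos hmem, if_pos (by simp [hmem] : r ∈ x :: xs), pvPrefAt, if_neg (Ne.symm hx)]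
            have hp := pvPrefAt_nonneg res xs r
            simp only [Prod.mk.injEq, true_and]
            omega
          · rw [if_neg hmem, if_neg (by simp [hx, hmem] : ¬ r ∈ x :: xs)]

-- the plan-zero comprehension and B's comprehension: a fold of inserts over distinct fresh keys
lemma pv_fold_insert_items (K : List String) (g : String → Int) (hK : K.Nodup) :
    (K.foldl (fun d r => d.insert r (g r)) PySem.Dict.empty).items
      = K.map (fun r => (r, g r)) := by
  have := PySem.Dict.items_foldl_insert_fresh K (fun a => a) g PySem.Dict.empty
    (by intro a _; simp) (by simpa using hK)
  simpa using this

-- ===== VERDICT (by name: the statement is the Claim_ definition above) =====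
theorem plan_discard_from_state_py_spec : Claim_equal_plan_discard_from_state_py := by
  intro state pid need _ _
  unfold Spec_plan_discard_from_state_py plan_discard_from_state_py plan_discard_from_state_py_alt
  set res := pvResOf state pid with hres
  set K := pvKeysOf res with hKdef
  set S := PySem.List.sorted K (fun r => r) false with hSdef
  have hKnd : K.Nodup := PySem.List.nodup_dedup _
  have hSnd : S.Nodup := ((PySem.List.sorted_perm K (fun r => r) false).nodup_iff).2 hKnd
  have hSK : ∀ r, r ∈ S ↔ r ∈ K := fun r => PySem.List.mem_sorted K (fun r => r) false r
  -- A's side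
  have hplan0 : (K.foldl (fun d r => d.insert r 0) PySem.Dict.empty).items
      = K.map (fun r => (r, (0 : Int))) := pv_fold_insert_items K (fun _ => 0) hKnd
  have hA := pvPlanLoop_items res S need K (fun _ => 0) _ hSnd hKnd hplan0
    (by intro r hr; exact ⟨(hSK r).1 hr, rfl⟩)
  -- B's side
  have hB := pv_fold_insert_items K
    (fun r => max 0 (min (PySem.Dict.getD (PySem.Dict.mk res) r 0)
      (need - PySem.Dict.getD (pvPrefLoop res S).1 r 0))) hKnd
  rw [hA, hB]
  apply List.map_congr_left
  intro r hrK
  have hrS : r ∈ S := (hSK r).2 hrK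
  have hpref : PySem.Dict.getD (pvPrefLoop res S).1 r 0 = pvPrefAt res S r := by
    unfold pvPrefLoop
    rw [pvPrefLoop_getD res S PySem.Dict.empty 0 r hSnd]
    simp [hrS]
  simp only [hrS, if_pos, hpref]
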